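-- pv_equiv track=rewrite | github.com/quantik-git/Laboratorios-Algoritmia-II | treino01/cruzamentos.py | cruzamentos
-- ===== SOURCE A (Python) =====
-- def cruzamentos(ruas):
--     cruzamentos = {}
--
--     for rua in ruas:
--         c1 = rua[0]
--         c2 = rua[-1]
--         if c1 not in cruzamentos and c1 != c2:
--             cruzamentos[c1] = 1
--         elif c1 != c2:
--             cruzamentos[c1] = cruzamentos[c1] + 1
--         if c2 not in cruzamentos:
--             cruzamentos[c2] = 1
--         else:
--             cruzamentos[c2] = cruzamentos[c2] + 1
--
--     res = cruzamentos.items()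
--
--     return sorted(res, key = lambda x : (x[1], x[0]))
-- ===== SOURCE B (Python) =====
-- def cruzamentos(ruas):
--     pontos = []
--     for rua in ruas:
--         pontos.append(rua[-1])
--         if rua[0] != rua[-1]:
--             pontos.append(rua[0])
--     pontos.sort()
--     pares = []
--     i = 0
--     n = len(pontos)
--     while i < n:
--         j = i
--         while j < n and pontos[j] == pontos[i]:
--             j += 1
--         pares.append((pontos[i], j - i))
--         i = j
--     return sorted(pares, key=lambda x: (x[1], x[0]))
-- ===== Notes on version B (the rewrite author's own statement) =====
-- stated objective: alternative
-- what changed: Replaces A's dict-accumulation with branch-heavy conditional updates by flattening all street endpoints into one list, sorting it, counting each run with a linear scan, and sorting the resulting pairs by (count, name).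
import Mathlib
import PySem

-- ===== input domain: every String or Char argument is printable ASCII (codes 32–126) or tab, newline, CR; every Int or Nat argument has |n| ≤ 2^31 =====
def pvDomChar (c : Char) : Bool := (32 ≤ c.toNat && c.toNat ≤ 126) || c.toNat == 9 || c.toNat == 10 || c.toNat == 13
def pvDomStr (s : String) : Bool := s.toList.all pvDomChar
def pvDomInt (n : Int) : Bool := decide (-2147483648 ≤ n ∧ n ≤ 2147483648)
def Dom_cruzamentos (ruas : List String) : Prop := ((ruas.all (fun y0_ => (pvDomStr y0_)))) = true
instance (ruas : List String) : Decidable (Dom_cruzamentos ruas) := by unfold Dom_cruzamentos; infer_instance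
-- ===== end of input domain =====

-- B replaces A's dict-accumulation by a sort-then-scan: flatten the street endpoints, sort them,
-- count each run; same return value, a different algorithm ('alternative', no speed claim).

-- rua[i] as Python's 1-character string; "" only where Python would raise IndexError (excluded by Pre_)
def pvEnd (rua : String) (i : Int) : String :=
  match PySem.Str.pyGet? rua i with
  | some c => String.ofList [c]
  | none => ""

-- ===== PORT A =====
def cruzamentos (ruas : List String) : List (String × Int) :=
  let d := ruas.foldl (fun cz rua =>
    let c1 := pvEnd rua 0
    let c2 := pvEnd rua (-1)
    let cz := if !cz.contains c1 && c1 != c2 then cz.insert c1 1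
              else if c1 != c2 then cz.insert c1 (cz.getD c1 0 + 1)
              else cz
    if !cz.contains c2 then cz.insert c2 1
    else cz.insert c2 (cz.getD c2 0 + 1)) PySem.Dict.empty
  PySem.List.sorted2 d.items (fun x => x.2) (fun x => x.1) false

-- ===== PORT B =====
-- the scanning while-loop of Source B: length of the run of copies of pontos[i], then jump past it
def pvRuns : List String → List (String × Int)
  | [] => []
  | c :: rest =>
    (c, 1 + ((rest.takeWhile (fun x => x == c)).length : Int)) ::
      pvRuns (rest.dropWhile (fun x => x == c))
  termination_by l => l.length
  decreasing_by exact Nat.lt_succ_of_le (List.length_dropWhile_le _ _)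

def cruzamentos_alt (ruas : List String) : List (String × Int) :=
  let pontos := ruas.foldl (fun acc rua =>
    let acc := acc ++ [pvEnd rua (-1)]
    if pvEnd rua 0 != pvEnd rua (-1) then acc ++ [pvEnd rua 0] else acc) []
  let pontos := PySem.List.sorted pontos (fun x => x) false
  PySem.List.sorted2 (pvRuns pontos) (fun x => x.2) (fun x => x.1) false

-- ===== PRECONDITION & SPEC =====
-- Pre_ excludes lists containing an empty street name, on which A (and B) raise IndexError at rua[0]/rua[-1].
def Pre_cruzamentos (ruas : List String) : Prop := ∀ s ∈ ruas, s ≠ ""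
instance (ruas : List String) : Decidable (Pre_cruzamentos ruas) := by unfold Pre_cruzamentos; infer_instance
def pvWitness_cruzamentos : List String := ["ab", "ba", "cc"]

def Spec_cruzamentos (ruas : List String) (out : List (String × Int)) : Prop := out = cruzamentos_alt ruas
instance (ruas : List String) (out : List (String × Int)) : Decidable (Spec_cruzamentos ruas out) := by unfold Spec_cruzamentos; infer_instance

-- ===== CLAIM (what is proved, stated in full; the proofs are below) =====
def Claim_equal_cruzamentos : Prop := ∀ (ruas : List String), Dom_cruzamentos ruas → Pre_cruzamentos ruas → Spec_cruzamentos ruas (cruzamentos ruas)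

-- ===== LEMMAS AND PROOFS =====

-- endpoint lists per street, in A's update order and in B's append order
def pvEndsA (rua : String) : List String :=
  (if pvEnd rua 0 ≠ pvEnd rua (-1) then [pvEnd rua 0] else []) ++ [pvEnd rua (-1)]

def pvEndsB (rua : String) : List String :=
  [pvEnd rua (-1)] ++ (if pvEnd rua 0 ≠ pvEnd rua (-1) then [pvEnd rua 0] else [])

lemma pvEndsB_perm_pvEndsA (rua : String) : (pvEndsB rua).Perm (pvEndsA rua) := by
  unfold pvEndsA pvEndsB; exact List.perm_append_comm

lemma flatMap_perm_of_perm {α β : Type} (f g : α → List β)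
    (h : ∀ a, (f a).Perm (g a)) (l : List α) : (l.flatMap f).Perm (l.flatMap g) := by
  induction l with
  | nil => simp
  | cons x xs ih => simpa using (h x).append ih

lemma ins_eq (cz : PySem.Dict String Int) (c : String) :
    (if !cz.contains c then cz.insert c 1 else cz.insert c (cz.getD c 0 + 1))
    = cz.insert c (cz.getD c 0 + 1) := by
  by_cases h : cz.contains c = true
  · simp [h]
  · have h' : cz.contains c = false := by simpa using h
    rw [PySem.Dict.getD_of_not_contains cz 0 h']; simp [h']

lemma step1_eq (cz : PySem.Dict String Int) (c1 c2 : String) :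
    (if !cz.contains c1 && c1 != c2 then cz.insert c1 1
     else if c1 != c2 then cz.insert c1 (cz.getD c1 0 + 1) else cz)
    = if c1 ≠ c2 then cz.insert c1 (cz.getD c1 0 + 1) else cz := by
  by_cases hne : c1 = c2
  · simp [hne]
  · by_cases hc : cz.contains c1 = true
    · simp [hne, hc, bne_iff_ne]
    · have h' : cz.contains c1 = false := by simpa using hc
      rw [PySem.Dict.getD_of_not_contains cz 0 h']
      simp [hne, h', bne_iff_ne]

-- A's per-street update is a counting fold over the street's endpoints
lemma stepA_eq (cz : PySem.Dict String Int) (rua : String) :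
    (let c1 := pvEnd rua 0
     let c2 := pvEnd rua (-1)
     let cz := if !cz.contains c1 && c1 != c2 then cz.insert c1 1
               else if c1 != c2 then cz.insert c1 (cz.getD c1 0 + 1)
               else cz
     if !cz.contains c2 then cz.insert c2 1
     else cz.insert c2 (cz.getD c2 0 + 1)) =
    (pvEndsA rua).foldl (fun d x => d.insert x (d.getD x 0 + 1)) cz := by
  simp only [pvEndsA]
  rw [step1_eq]
  by_cases hne : pvEnd rua 0 ≠ pvEnd rua (-1)
  · rw [if_pos hne, if_pos hne]
    simp only [List.cons_append, List.nil_append, List.foldl_cons, List.foldl_nil]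
    exact ins_eq _ _
  · rw [if_neg hne, if_neg hne]
    simp only [List.nil_append, List.foldl_cons, List.foldl_nil]
    exact ins_eq _ _

-- A's whole loop is Counter over the flattened endpoint list
lemma dictA_eq_counter (ruas : List String) :
    ruas.foldl (fun cz rua =>
      let c1 := pvEnd rua 0
      let c2 := pvEnd rua (-1)
      let cz := if !cz.contains c1 && c1 != c2 then cz.insert c1 1
                else if c1 != c2 then cz.insert c1 (cz.getD c1 0 + 1)
                else cz
      if !cz.contains c2 then cz.insert c2 1
      else cz.insert c2 (cz.getD c2 0 + 1)) PySem.Dict.empty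
    = PySem.Dict.counter (ruas.flatMap pvEndsA) := by
  rw [PySem.List.foldl_congr_mem ruas _
    (fun cz rua => (pvEndsA rua).foldl (fun d x => d.insert x (d.getD x 0 + 1)) cz)
    PySem.Dict.empty (fun cz rua _ => stepA_eq cz rua)]
  rw [← List.foldl_flatMap]
  exact PySem.Dict.foldl_insert_getD_add_one_eq_counter _

-- B's accumulation loop is the flattened endpoint list
lemma pontosB_eq (ruas : List String) :
    ruas.foldl (fun acc rua =>
      let acc := acc ++ [pvEnd rua (-1)]
      if pvEnd rua 0 != pvEnd rua (-1) then acc ++ [pvEnd rua 0] else acc) []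
    = ruas.flatMap pvEndsB := by
  rw [PySem.List.foldl_congr_mem ruas _ (fun acc rua => acc ++ pvEndsB rua) []
    (fun acc rua _ => by
      by_cases hne : pvEnd rua 0 = pvEnd rua (-1)
      · simp [pvEndsB, hne]
      · simp [pvEndsB, hne, bne_iff_ne, List.append_assoc])]
  simpa using PySem.List.foldl_append_eq_flatMap pvEndsB ruas []

-- run facts about a sorted list
lemma run_facts (c : String) (rest : List String) (hp : (c :: rest).Pairwise (· ≤ ·)) :
    ((c :: rest).count c = 1 + (rest.takeWhile (fun x => x == c)).length)
    ∧ c ∉ rest.dropWhile (fun x => x == c)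
    ∧ (∀ x, x ≠ c → ((x ∈ c :: rest ↔ x ∈ rest.dropWhile (fun x => x == c))
        ∧ (c :: rest).count x = (rest.dropWhile (fun x => x == c)).count x))
    ∧ (rest.dropWhile (fun x => x == c)).Pairwise (· ≤ ·) := by
  have hle : ∀ x ∈ rest, c ≤ x := fun x hx => List.rel_of_pairwise_cons hp hx
  have hrest : rest.Pairwise (· ≤ ·) := hp.of_cons
  have hdw : (rest.dropWhile (fun x => x == c)).Pairwise (· ≤ ·) :=
    List.Pairwise.sublist (List.dropWhile_sublist _) hrest
  have htw : ∀ x ∈ rest.takeWhile (fun x => x == c), x = c := by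
    intro x hx
    exact eq_of_beq (List.mem_takeWhile_imp (p := fun x => x == c) hx)
  have hnotc : c ∉ rest.dropWhile (fun x => x == c) := by
    cases hdwe : rest.dropWhile (fun x => x == c) with
    | nil => simp
    | cons e t =>
      have w : rest.dropWhile (fun x => x == c) ≠ [] := by simp [hdwe]
      have hhead := List.head_dropWhile_not (fun x => x == c) w
      have he : (rest.dropWhile (fun x => x == c)).head w = e := by simp [hdwe]
      rw [he] at hhead
      have hec : e ≠ c := by
        have hh : (e == c) = false := hhead
        exact fun h => by simp [h] at hh
      have hece : e ∈ rest := by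
        have he2 : e ∈ rest.dropWhile (fun x => x == c) := by rw [hdwe]; exact List.mem_cons_self
        exact List.Sublist.mem he2 (List.dropWhile_sublist _)
      have hlt : c < e := lt_of_le_of_ne (hle e hece) (fun h => hec h.symm)
      have ht : ∀ x ∈ t, e ≤ x := fun x hx => List.rel_of_pairwise_cons (hdwe ▸ hdw) hx
      intro hmem
      rcases (by simpa [hdwe] using hmem : c = e ∨ c ∈ t) with h | h
      · exact hec h.symm
      · exact absurd (lt_of_lt_of_le hlt (ht c h)) (lt_irrefl c)
  have hrest_eq : rest = rest.takeWhile (fun x => x == c) ++ rest.dropWhile (fun x => x == c) :=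
    (List.takeWhile_append_dropWhile).symm
  refine ⟨?_, hnotc, ?_, hdw⟩
  · have h2 : rest.count c = (rest.takeWhile (fun x => x == c)).count c
        + (rest.dropWhile (fun x => x == c)).count c := by
      conv_lhs => rw [hrest_eq]
      exact List.count_append
    rw [List.count_cons_self, h2,
      (List.count_eq_length).2 (fun b hb => (htw b hb).symm),
      List.count_eq_zero.2 hnotc]
    omega
  · intro x hx
    have hxtw : x ∉ rest.takeWhile (fun x => x == c) := fun h => hx (htw x h)
    constructor
    · have hx2 : x ∈ rest ↔ x ∈ rest.dropWhile (fun x => x == c) := by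
        conv_lhs => rw [hrest_eq]
        simp only [List.mem_append]
        exact or_iff_right hxtw
      rw [List.mem_cons, hx2]
      exact or_iff_right hx
    · rw [List.count_cons_of_ne (Ne.symm hx)]
      conv_lhs => rw [hrest_eq]
      rw [List.count_append, List.count_eq_zero.2 hxtw, Nat.zero_add]

-- run-length pairs of a sorted list: membership characterisation
lemma mem_pvRuns_of_sorted (S : List String) (hp : S.Pairwise (· ≤ ·)) (p : String × Int) :
    p ∈ pvRuns S ↔ p.1 ∈ S ∧ p.2 = (S.count p.1 : Int) := by
  induction S using pvRuns.induct with
  | case1 => simp [pvRuns]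
  | case2 c rest ih =>
    obtain ⟨hcnt, hnotc, hother, hdw⟩ := run_facts c rest hp
    obtain ⟨a, b⟩ := p
    rw [pvRuns, List.mem_cons, ih hdw]
    simp only [Prod.mk.injEq]
    constructor
    · rintro (⟨rfl, rfl⟩ | ⟨h1, h2⟩)
      · refine ⟨List.mem_cons_self, ?_⟩
        rw [hcnt]; push_cast; ring
      · have hne : a ≠ c := fun h => hnotc (h ▸ h1)
        exact ⟨((hother a hne).1).2 h1, by rw [h2, ((hother a hne).2)]⟩
    · rintro ⟨h1, h2⟩
      by_cases hne : a = c
      · subst hne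
        left
        rw [hcnt] at h2
        push_cast at h2
        exact ⟨rfl, h2⟩
      · right
        exact ⟨(hother a hne).1.1 h1, by rw [h2, (hother a hne).2]⟩

lemma nodup_pvRuns_of_sorted (S : List String) (hp : S.Pairwise (· ≤ ·)) :
    (pvRuns S).Nodup := by
  induction S using pvRuns.induct with
  | case1 => simp [pvRuns]
  | case2 c rest ih =>
    obtain ⟨hcnt, hnotc, hother, hdw⟩ := run_facts c rest hp
    rw [pvRuns]
    refine List.Nodup.cons ?_ (ih hdw)
    intro hmem
    have := ((mem_pvRuns_of_sorted _ hdw _).1 hmem).1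
    exact hnotc (by simpa using this)

-- the final sorted(…, key=lambda x: (x[1], x[0])) as a single lexicographic key
lemma sorted2_eq_sorted_toLex {α : Type} (xs : List α) (k1 : α → Int) (k2 : α → String) :
    PySem.List.sorted2 xs k1 k2 false = PySem.List.sorted xs (fun x => toLex (k1 x, k2 x)) false := by
  have hbefore : (fun a b => decide (k1 a < k1 b) || !decide (k1 b < k1 a) && decide (k2 a < k2 b))
      = (fun a b => decide ((toLex (k1 a, k2 a) : Lex (Int × String)) < toLex (k1 b, k2 b))) := by
    funext a b
    rcases lt_trichotomy (k1 a) (k1 b) with h | h | h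
    · simp [Prod.Lex.toLex_lt_toLex, h]
    · simp [Prod.Lex.toLex_lt_toLex, h]
    · simp [Prod.Lex.toLex_lt_toLex, h, not_lt_of_gt h, ne_of_gt h]
  simp only [PySem.List.sorted2, PySem.List.sorted, if_neg (by decide : ¬(false = true))]
  rw [hbefore]

lemma key_injective : Function.Injective
    (fun x : String × Int => (toLex (x.2, x.1) : Lex (Int × String))) := by
  intro a b h
  have h' : (a.2, a.1) = (b.2, b.1) := congrArg (fun y : Lex (Int × String) => ofLex y) h
  exact Prod.ext (congrArg Prod.snd h') (congrArg Prod.fst h')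

-- ===== VERDICT (by name: the statement is the Claim_ definition above) =====
theorem cruzamentos_spec : Claim_equal_cruzamentos := by
  intro ruas _ _
  show cruzamentos ruas = cruzamentos_alt ruas
  unfold cruzamentos cruzamentos_alt
  rw [dictA_eq_counter, pontosB_eq]
  dsimp only
  rw [PySem.Dict.items_counter]
  rw [sorted2_eq_sorted_toLex, sorted2_eq_sorted_toLex]
  apply PySem.List.sorted_eq_sorted_of_perm _ _ _ key_injective
  -- the Counter items and the run-length pairs are permutations of each other
  set E := ruas.flatMap pvEndsA with hE
  set S := PySem.List.sorted (ruas.flatMap pvEndsB) (fun x => x) false with hS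
  have hSE : S.Perm E :=
    (PySem.List.sorted_perm _ _ _).trans (flatMap_perm_of_perm _ _ pvEndsB_perm_pvEndsA ruas)
  have hp : S.Pairwise (· ≤ ·) := PySem.List.sorted_pairwise _ (fun x => x)
  have hnodupA : ((PySem.Set.ofList E).map (fun k => (k, (E.count k : Int)))).Nodup :=
    (PySem.Set.nodup_ofList E).map (fun a b h => congrArg Prod.fst h)
  rw [List.perm_ext_iff_of_nodup hnodupA (nodup_pvRuns_of_sorted S hp)]
  intro p
  rw [mem_pvRuns_of_sorted S hp p, hSE.mem_iff, hSE.count_eq]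
  constructor
  · intro hmem
    obtain ⟨k, hk, hkp⟩ := List.mem_map.1 hmem
    subst hkp
    exact ⟨(PySem.Set.mem_ofList E k).1 hk, rfl⟩
  · rintro ⟨h1, h2⟩
    exact List.mem_map.2 ⟨p.1, (PySem.Set.mem_ofList E p.1).2 h1,
      by rw [← h2]⟩
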